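-- pv_equiv track=rewrite | github.com/yas-sim/floppy_disk_shield_2d | trim.py | mfmbs_to_distbuf
-- ===== SOURCE A (Python) =====
-- def mfmbs_to_distbuf(mfmbs:list):
--     dist = 0
--     dist_buf = []
--     for bit in mfmbs:
--         dist += 1
--         if bit == 1:
--             dist_buf.append(dist)
--             dist = 0
--     if dist != 0:
--         dist_buf.append(dist)
--     return dist_buf
-- ===== SOURCE B (Python) =====
-- def mfmbs_to_distbuf(mfmbs: list):
--     idx = [i for i, b in enumerate(mfmbs) if b == 1]
--     if not idx:
--         return [len(mfmbs)] if mfmbs else []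
--     prev = -1
--     out = []
--     for i in idx:
--         out.append(i - prev)
--         prev = i
--     t = len(mfmbs) - 1 - idx[-1]
--     if t > 0:
--         out.append(t)
--     return out
-- ===== Notes on version B (the rewrite author's own statement) =====
-- stated objective: alternative
-- what changed: Instead of a single reset-counter loop, B first builds the index table of positions of 1-bits, then emits consecutive differences of those indices against a virtual previous position -1, and finally appends the trailing run length only when positive (with a separate no-ones case).
import Mathlib
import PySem

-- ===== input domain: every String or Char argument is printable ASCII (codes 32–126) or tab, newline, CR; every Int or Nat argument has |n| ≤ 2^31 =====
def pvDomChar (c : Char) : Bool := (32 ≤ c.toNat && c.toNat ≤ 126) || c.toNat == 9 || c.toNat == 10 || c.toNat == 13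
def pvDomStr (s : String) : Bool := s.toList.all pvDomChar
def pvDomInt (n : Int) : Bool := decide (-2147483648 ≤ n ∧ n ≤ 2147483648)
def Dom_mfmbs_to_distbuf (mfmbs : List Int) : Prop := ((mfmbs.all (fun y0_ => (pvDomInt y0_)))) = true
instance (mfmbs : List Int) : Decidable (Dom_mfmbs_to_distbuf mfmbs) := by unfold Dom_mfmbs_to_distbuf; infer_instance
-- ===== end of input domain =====

-- B builds the index table of 1-bit positions and emits consecutive index differences
-- (objective: alternative decomposition; same return value, same O(n) cost).
-- ===== PORT A =====
-- the loop 'for bit in mfmbs: dist += 1; if bit == 1: ...' with state (dist, dist_buf)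
def pvLoopA : List Int → Int → List Int → (Int × List Int)
  | [], dist, buf => (dist, buf)
  | bit :: rest, dist, buf =>
      let d := dist + 1
      if bit == 1 then pvLoopA rest 0 (buf ++ [d]) else pvLoopA rest d buf

def mfmbs_to_distbuf (mfmbs : List Int) : List Int :=
  let r := pvLoopA mfmbs 0 []
  if r.1 ≠ 0 then r.2 ++ [r.1] else r.2

-- ===== PORT B =====
-- [i for i, b in enumerate(mfmbs) if b == 1]
def pvIdx (mfmbs : List Int) : List Int :=
  ((PySem.List.enumerate mfmbs).filter (fun p => p.2 == 1)).map (fun p => p.1)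

-- the 'for i in idx: out.append(i - prev); prev = i' loop, with out built structurally
def pvDiffs : Int → List Int → List Int
  | _, [] => []
  | prev, i :: rest => (i - prev) :: pvDiffs i rest

def mfmbs_to_distbuf_alt (mfmbs : List Int) : List Int :=
  let idx := pvIdx mfmbs
  if idx = [] then (if mfmbs ≠ [] then [(mfmbs.length : Int)] else [])
  else
    let out := pvDiffs (-1) idx
    let t := (mfmbs.length : Int) - 1 - PySem.List.pyGetD idx (-1) 0  -- idx[-1]; idx nonempty here
    if t > 0 then out ++ [t] else out

-- ===== PRECONDITION & SPEC =====
def Spec_mfmbs_to_distbuf (mfmbs : List Int) (out : List Int) : Prop := out = mfmbs_to_distbuf_alt mfmbs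
instance (mfmbs : List Int) (out : List Int) : Decidable (Spec_mfmbs_to_distbuf mfmbs out) := by unfold Spec_mfmbs_to_distbuf; infer_instance

-- ===== CLAIM (what is proved, stated in full; the proofs are below) =====
def Claim_equal_mfmbs_to_distbuf : Prop := ∀ (mfmbs : List Int), Dom_mfmbs_to_distbuf mfmbs → Spec_mfmbs_to_distbuf mfmbs (mfmbs_to_distbuf mfmbs)

-- ===== LEMMAS AND PROOFS =====

-- reference recursion g: the common semantics both ports are reduced to
def pvG : List Int → Int → List Int
  | [], d => if d ≠ 0 then [d] else []
  | b :: rest, d => if b == 1 then (d + 1) :: pvG rest 0 else pvG rest (d + 1)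

theorem pvLoopA_g (l : List Int) : ∀ (d : Int) (buf : List Int),
    (if (pvLoopA l d buf).1 ≠ 0 then (pvLoopA l d buf).2 ++ [(pvLoopA l d buf).1]
     else (pvLoopA l d buf).2) = buf ++ pvG l d := by
  induction l with
  | nil => intro d buf; simp [pvLoopA, pvG]; split <;> simp
  | cons b rest ih =>
      intro d buf
      simp only [pvLoopA, pvG]
      by_cases hb : b == 1
      · simp [hb, ih]
      · simp [hb, ih]

theorem pvA_g (l : List Int) : mfmbs_to_distbuf l = pvG l 0 := by
  have := pvLoopA_g l 0 []
  simpa [mfmbs_to_distbuf] using this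

theorem enumerate_shift {α : Type} (l : List α) : ∀ s : Int,
    PySem.List.enumerate l (s + 1) = (PySem.List.enumerate l s).map (fun p => (p.1 + 1, p.2)) := by
  induction l with
  | nil => intro s; simp [PySem.List.enumerate_nil]
  | cons x xs ih =>
      intro s
      rw [PySem.List.enumerate_cons, PySem.List.enumerate_cons]
      simp [ih (s + 1)]

theorem pvIdx_cons (b : Int) (rest : List Int) :
    pvIdx (b :: rest) = (if b == 1 then [(0 : Int)] else []) ++ (pvIdx rest).map (· + 1) := by
  unfold pvIdx
  rw [PySem.List.enumerate_cons, enumerate_shift rest 0]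
  by_cases hb : b == 1 <;>
    simp [hb, List.filter_map, List.map_map, Function.comp_def]

theorem pvDiffs_shift (l : List Int) : ∀ p : Int,
    pvDiffs p (l.map (· + 1)) = pvDiffs (p - 1) l := by
  induction l with
  | nil => intro p; simp [pvDiffs]
  | cons x xs ih =>
      intro p
      simp only [List.map_cons, pvDiffs, ih]
      have h1 : x + 1 - p = x - (p - 1) := by ring
      have h2 : x + 1 - 1 = x := by ring
      rw [h1, h2]

theorem getLastD_map_shift (l : List Int) : ∀ a : Int,
    (l.map (· + 1)).getLastD (a + 1) = l.getLastD a + 1 := by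
  induction l with
  | nil => intro a; simp
  | cons x xs ih =>
      intro a
      simp only [List.map_cons, List.getLastD_cons]
      exact ih x

theorem getLastD_map_cons (j : Int) (js : List Int) :
    ((j :: js).map (· + 1)).getLastD 0 = (j :: js).getLastD 0 + 1 := by
  simp only [List.map_cons, List.getLastD_cons]
  exact getLastD_map_shift js j

theorem getLast_eq_getLastD (i0 : Int) (is : List Int) (h : i0 :: is ≠ []) :
    (i0 :: is).getLast h = (i0 :: is).getLastD 0 := by
  induction is generalizing i0 with
  | nil => rfl
  | cons y ys ih =>
      rw [List.getLast_cons (by simp), ih y (by simp)]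
      simp only [List.getLastD_cons]

-- B's body, generalized over the virtual previous position / accumulated distance d
def pvBG (l : List Int) (d : Int) : List Int :=
  let idx := pvIdx l
  if idx = [] then (if d + l.length ≠ 0 then [d + l.length] else [])
  else
    let out := pvDiffs (-(d + 1)) idx
    let t := (l.length : Int) - 1 - idx.getLastD 0
    if t > 0 then out ++ [t] else out

theorem pvBG_eq_nil (l : List Int) (d : Int) (h : pvIdx l = []) :
    pvBG l d = if d + l.length ≠ 0 then [d + l.length] else [] := by
  simp [pvBG, h]

theorem pvBG_eq_cons (l : List Int) (d j : Int) (js : List Int) (h : pvIdx l = j :: js) :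
    pvBG l d =
      if (l.length : Int) - 1 - (j :: js).getLastD 0 > 0 then
        pvDiffs (-(d + 1)) (j :: js) ++ [(l.length : Int) - 1 - (j :: js).getLastD 0]
      else pvDiffs (-(d + 1)) (j :: js) := by
  simp [pvBG, h]

theorem pvBG_g (l : List Int) : ∀ d : Int, pvBG l d = pvG l d := by
  induction l with
  | nil =>
      intro d
      simp [pvBG_eq_nil [] d (by simp [pvIdx, PySem.List.enumerate_nil]), pvG]
  | cons b rest ih =>
      intro d
      have hL : ((b :: rest).length : Int) = (rest.length : Int) + 1 := by
        simp
      by_cases hb : b == 1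
      · have hg : pvG (b :: rest) d = (d + 1) :: pvG rest 0 := by simp [pvG, hb]
        rw [hg, ← ih 0]
        have hidx : pvIdx (b :: rest) = 0 :: (pvIdx rest).map (· + 1) := by
          rw [pvIdx_cons]; simp [hb]
        cases hr : pvIdx rest with
        | nil =>
            rw [pvBG_eq_cons _ d 0 [] (by rw [hidx, hr]; simp), pvBG_eq_nil _ 0 hr, hL]
            by_cases hlen : (rest.length : Int) = 0
            · rw [if_neg (by simp [hlen]), if_neg (by omega)]
              simp [pvDiffs]
            · rw [if_pos (by simp; omega), if_pos (by omega)]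
              simp [pvDiffs]
        | cons j js =>
            have hmap : (pvIdx rest).map (· + 1) = (j + 1) :: js.map (· + 1) := by
              rw [hr]; simp
            rw [pvBG_eq_cons _ d 0 ((j + 1) :: js.map (· + 1)) (by rw [hidx, hmap]),
                pvBG_eq_cons _ 0 j js hr]
            have hdiffs : pvDiffs (-(d + 1)) ((0 : Int) :: (j + 1) :: js.map (· + 1))
                = (d + 1) :: pvDiffs (-(0 + 1)) (j :: js) := by
              rw [show ((j + 1) :: js.map (· + 1)) = (j :: js).map (· + 1) from by simp]
              simp only [pvDiffs, pvDiffs_shift]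
              norm_num
            have hlast : ((0 : Int) :: (j + 1) :: js.map (· + 1)).getLastD 0
                = (j :: js).getLastD 0 + 1 := by
              rw [List.getLastD_cons,
                show ((j + 1) :: js.map (· + 1)) = (j :: js).map (· + 1) from by simp]
              exact getLastD_map_cons j js
            rw [hdiffs, hlast, hL]
            have ht : (rest.length : Int) + 1 - 1 - ((j :: js).getLastD 0 + 1)
                = (rest.length : Int) - 1 - (j :: js).getLastD 0 := by ring
            rw [ht]
            split <;> simp
      · have hg : pvG (b :: rest) d = pvG rest (d + 1) := by simp [pvG, hb]
        rw [hg, ← ih (d + 1)]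
        have hidx : pvIdx (b :: rest) = (pvIdx rest).map (· + 1) := by
          rw [pvIdx_cons]; simp [hb]
        cases hr : pvIdx rest with
        | nil =>
            rw [pvBG_eq_nil _ d (by rw [hidx, hr]; simp), pvBG_eq_nil _ (d + 1) hr, hL]
            have hc : d + ((rest.length : Int) + 1) = d + 1 + (rest.length : Int) := by ring
            rw [hc]
        | cons j js =>
            have hmap : (pvIdx rest).map (· + 1) = (j + 1) :: js.map (· + 1) := by
              rw [hr]; simp
            rw [pvBG_eq_cons _ d (j + 1) (js.map (· + 1)) (by rw [hidx, hmap]),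
                pvBG_eq_cons _ (d + 1) j js hr]
            have hdiffs : pvDiffs (-(d + 1)) ((j + 1) :: js.map (· + 1))
                = pvDiffs (-(d + 1 + 1)) (j :: js) := by
              rw [show ((j + 1) :: js.map (· + 1)) = (j :: js).map (· + 1) from by simp,
                pvDiffs_shift]
              congr 1
              ring
            have hlast : ((j + 1) :: js.map (· + 1)).getLastD 0 = (j :: js).getLastD 0 + 1 := by
              rw [show ((j + 1) :: js.map (· + 1)) = (j :: js).map (· + 1) from by simp]
              exact getLastD_map_cons j js
            rw [hdiffs, hlast, hL]
            have ht : (rest.length : Int) + 1 - 1 - ((j :: js).getLastD 0 + 1)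
                = (rest.length : Int) - 1 - (j :: js).getLastD 0 := by ring
            rw [ht]

theorem pvB_BG (l : List Int) : mfmbs_to_distbuf_alt l = pvBG l 0 := by
  cases hr : pvIdx l with
  | nil =>
      unfold mfmbs_to_distbuf_alt
      rw [pvBG_eq_nil _ 0 hr]
      rw [if_pos hr]
      by_cases he : l = []
      · simp [he]
      · have h0 : ((l.length : Int)) ≠ 0 := by
          simp [he, List.length_eq_zero_iff]
        rw [if_pos he, if_pos (by omega)]
        norm_num
  | cons j js =>
      unfold mfmbs_to_distbuf_alt
      rw [pvBG_eq_cons _ 0 j js hr]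
      have hg : PySem.List.pyGetD (j :: js) (-1) 0 = (j :: js).getLastD 0 := by
        rw [PySem.List.pyGetD_neg_one (j :: js) 0 (by simp)]
        exact getLast_eq_getLastD j js (by simp)
      simp only [hr, hg]
      rw [if_neg (by simp)]
      norm_num

-- ===== VERDICT (by name: the statement is the Claim_ definition above) =====
theorem mfmbs_to_distbuf_spec : Claim_equal_mfmbs_to_distbuf := by
  intro l _
  unfold Spec_mfmbs_to_distbuf
  rw [pvA_g, pvB_BG, pvBG_g]
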